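-- pv_equiv track=rewrite | github.com/HugoMFFernandes/Exerc-cios_Pc_1 | Exames/Exame_2024_B.py | Transforma_matriz
-- ===== SOURCE A (Python) =====
-- def Transforma_matriz(A):
--     for i in range(len(A)):
--         max=A[i][0]
--         id_max=0
--         min=A[i][0]
--         id_min=0
--         #Determinar o elemento maximo e minimo da linha
--         for j in range(1,len(A[i])):
--             if A[i][j]>max:
--                 max=A[i][j]
--                 id_max=j
--
--             if A[i][j]<min:
--                 min=A[i][j]
--                 id_min=j
--         #Trocar os elementos
--         A[i][id_min]=max
--         A[i][id_max]=min
--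
--     return A
-- ===== SOURCE B (Python) =====
-- def Transforma_matriz(A):
--     for row in A:
--         i_min = sorted(range(len(row)), key=lambda j: row[j])[0]
--         i_max = sorted(range(len(row)), key=lambda j: row[j], reverse=True)[0]
--         row[i_min], row[i_max] = row[i_max], row[i_min]
--     return A
-- ===== Notes on version B (the rewrite author's own statement) =====
-- stated objective: alternative
-- what changed: Replaces A's fused linear scan tracking running max/min and their indices with a sort-based argsort: a stable ascending sort of the row's indices by value yields the first-minimum index and a stable descending sort yields the first-maximum index, then the two cells are swapped.
import Mathlib
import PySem

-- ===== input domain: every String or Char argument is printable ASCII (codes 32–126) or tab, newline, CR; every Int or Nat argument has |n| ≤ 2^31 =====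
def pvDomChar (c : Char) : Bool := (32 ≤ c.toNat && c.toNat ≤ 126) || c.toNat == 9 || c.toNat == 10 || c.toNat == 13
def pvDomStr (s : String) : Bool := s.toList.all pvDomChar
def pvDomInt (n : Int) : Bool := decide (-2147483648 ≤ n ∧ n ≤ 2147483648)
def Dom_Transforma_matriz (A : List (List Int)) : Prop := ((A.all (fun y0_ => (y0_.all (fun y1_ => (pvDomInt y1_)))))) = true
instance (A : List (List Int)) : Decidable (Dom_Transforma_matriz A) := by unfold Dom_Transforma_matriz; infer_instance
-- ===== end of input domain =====

-- B swaps each row's first maximum and first minimum found by two stable argsorts of the row's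
-- indices (ascending head = first-min index, descending head = first-max index) instead of A's
-- fused index-tracking scan (objective: alternative algorithm); both mutate A in place in Python,
-- the equivalence proved is about the return value.

-- ===== PORT A =====
-- the inner 'for j in range(1, len(row))' loop body, state (max, id_max, min, id_min)
def pvStepA (row : List Int) (s : Int × Int × Int × Int) (j : Int) : Int × Int × Int × Int :=
  let v := PySem.List.pyGetD row j 0
  let s1 := if v > s.1 then (v, j, s.2.2.1, s.2.2.2) else s
  if v < s1.2.2.1 then (s1.1, s1.2.1, v, j) else s1

def pvRowA (row : List Int) : List Int :=
  let m0 := PySem.List.pyGetD row 0 0          -- A[i][0]: IndexError on empty row, excluded by Pre_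
  let st := (PySem.List.pyRange 1 (PySem.List.len row) 1).foldl (pvStepA row) (m0, 0, m0, 0)
  PySem.List.pySetD (PySem.List.pySetD row st.2.2.2 st.1) st.2.1 st.2.2.1

def Transforma_matriz (A : List (List Int)) : List (List Int) :=
  A.map pvRowA

-- ===== PORT B =====
def pvRowB (row : List Int) : List Int :=
  -- sorted(range(len(row)), key=lambda j: row[j])[0]; [0] of an empty sort (empty row) is an
  -- IndexError, excluded by Pre_; the key's row[j] is always in range, pyGetD's default is never used
  let iMin := (PySem.List.pyGet? (PySem.List.sorted (PySem.List.pyRange 0 (PySem.List.len row))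
      (fun j => PySem.List.pyGetD row j 0)) 0).getD 0
  let iMax := (PySem.List.pyGet? (PySem.List.sorted (PySem.List.pyRange 0 (PySem.List.len row))
      (fun j => PySem.List.pyGetD row j 0) true) 0).getD 0
  -- row[i_min], row[i_max] = row[i_max], row[i_min]
  let tmp := (PySem.List.pyGetD row iMax 0, PySem.List.pyGetD row iMin 0)
  PySem.List.pySetD (PySem.List.pySetD row iMin tmp.1) iMax tmp.2

def Transforma_matriz_alt (A : List (List Int)) : List (List Int) :=
  A.map pvRowB

-- ===== PRECONDITION & SPEC =====
-- Pre_ excludes matrices with an empty row: there A raises IndexError (A[i][0]) and B raises IndexError (sorted(...)[0]).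
def Pre_Transforma_matriz (A : List (List Int)) : Prop := ∀ row ∈ A, row ≠ []
instance (A : List (List Int)) : Decidable (Pre_Transforma_matriz A) := by unfold Pre_Transforma_matriz; infer_instance
def pvWitness_Transforma_matriz : List (List Int) := [[3, 1, 2], [5, 5, -1]]

def Spec_Transforma_matriz (A : List (List Int)) (out : List (List Int)) : Prop := out = Transforma_matriz_alt A
instance (A : List (List Int)) (out : List (List Int)) : Decidable (Spec_Transforma_matriz A out) := by unfold Spec_Transforma_matriz; infer_instance

-- ===== CLAIM (what is proved, stated in full; the proofs are below) =====
def Claim_equal_Transforma_matriz : Prop := ∀ (A : List (List Int)), Dom_Transforma_matriz A → Pre_Transforma_matriz A → Spec_Transforma_matriz A (Transforma_matriz A)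

-- ===== LEMMAS AND PROOFS =====

-- xs[0] of any list is its head
lemma pvGet0 (xs : List Int) : PySem.List.pyGet? xs 0 = xs.head? := by
  cases xs <;> simp [PySem.List.pyGet?, PySem.List.pyIdx?]

-- the head of an insertion-sort fold from a nonempty accumulator is the running "first extremal" fold
lemma pvHead_foldl_insertBy (lt : Int → Int → Bool) (xs : List Int) (h : Int) (rest : List Int) :
    (xs.foldl (fun acc y => PySem.List.insertBy lt y acc) (h :: rest)).head?
      = some (xs.foldl (fun m y => if lt y m then y else m) h) := by
  induction xs generalizing h rest with
  | nil => rfl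
  | cons y ys ih =>
      simp only [List.foldl_cons, PySem.List.insertBy]
      split
      · exact ih _ _
      · exact ih _ _

-- A's inner loop, started at value/index pairs, is the pair of "first extremal index" folds
lemma pvFoldA_eq (row : List Int) (js : List Int) (iM im : Int) :
    js.foldl (pvStepA row) (PySem.List.pyGetD row iM 0, iM, PySem.List.pyGetD row im 0, im)
      = (PySem.List.pyGetD row (js.foldl (fun m j => if PySem.List.pyGetD row m 0 < PySem.List.pyGetD row j 0 then j else m) iM) 0,
         js.foldl (fun m j => if PySem.List.pyGetD row m 0 < PySem.List.pyGetD row j 0 then j else m) iM,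
         PySem.List.pyGetD row (js.foldl (fun m j => if PySem.List.pyGetD row j 0 < PySem.List.pyGetD row m 0 then j else m) im) 0,
         js.foldl (fun m j => if PySem.List.pyGetD row j 0 < PySem.List.pyGetD row m 0 then j else m) im) := by
  induction js generalizing iM im with
  | nil => rfl
  | cons j js ih =>
      simp only [List.foldl_cons]
      have hstep : pvStepA row (PySem.List.pyGetD row iM 0, iM, PySem.List.pyGetD row im 0, im) j
          = (PySem.List.pyGetD row (if PySem.List.pyGetD row iM 0 < PySem.List.pyGetD row j 0 then j else iM) 0,
             (if PySem.List.pyGetD row iM 0 < PySem.List.pyGetD row j 0 then j else iM),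
             PySem.List.pyGetD row (if PySem.List.pyGetD row j 0 < PySem.List.pyGetD row im 0 then j else im) 0,
             (if PySem.List.pyGetD row j 0 < PySem.List.pyGetD row im 0 then j else im)) := by
        unfold pvStepA
        simp only [gt_iff_lt]
        by_cases h1 : PySem.List.pyGetD row iM 0 < PySem.List.pyGetD row j 0 <;>
          by_cases h2 : PySem.List.pyGetD row j 0 < PySem.List.pyGetD row im 0 <;>
          simp [h1, h2]
      rw [hstep]
      split_ifs <;> exact ih _ _

-- per-row agreement on a nonempty row
lemma pvRowA_eq_pvRowB (row : List Int) (h : row ≠ []) : pvRowA row = pvRowB row := by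
  have hn : (0 : Int) < PySem.List.len row := by
    simp only [PySem.List.len_eq]
    cases row with
    | nil => exact absurd rfl h
    | cons a t => simp only [List.length_cons]; omega
  have hrange : PySem.List.pyRange 0 (PySem.List.len row)
      = 0 :: PySem.List.pyRange 1 (PySem.List.len row) := by
    have := PySem.List.pyRange_one_cons (a := 0) (b := PySem.List.len row) hn
    simpa using this
  unfold pvRowA pvRowB
  rw [PySem.List.sorted_eq_foldl_insertBy, PySem.List.sorted_rev_eq_foldl_insertBy, hrange]
  simp only [List.foldl_cons, PySem.List.insertBy]
  rw [pvGet0, pvGet0, pvHead_foldl_insertBy, pvHead_foldl_insertBy]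
  rw [pvFoldA_eq row (PySem.List.pyRange 1 (PySem.List.len row) 1) 0 0]
  simp only [Option.getD_some, decide_eq_true_eq]

-- ===== VERDICT (by name: the statement is the Claim_ definition above) =====
theorem Transforma_matriz_spec : Claim_equal_Transforma_matriz := by
  intro A _ hpre
  unfold Spec_Transforma_matriz Transforma_matriz Transforma_matriz_alt
  exact List.map_congr_left (fun row hrow => pvRowA_eq_pvRowB row (hpre row hrow))
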